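-- pv_equiv track=rewrite | github.com/keegang6705/midi-player-for-games | midiplayer.py | _find_optimal_range
-- ===== SOURCE A (Python) =====
-- def _find_optimal_range(notes, min_key, max_key):
--     """Find the range in MIDI notes that maps to the most keymap keys."""
--     if not notes:
--         return 0, 127
--
--     unique_notes = sorted(set(notes))
--     best_range = (unique_notes[0], unique_notes[-1])
--     best_count = 0
--
--     for i, start_note in enumerate(unique_notes):
--         for end_note in unique_notes[i:]:
--             count = len([n for n in unique_notes if start_note <= n <= end_note])
--             if count > best_count:
--                 best_count = count
--                 best_range = (start_note, end_note)
--
--     return best_range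
-- ===== SOURCE B (Python) =====
-- def _find_optimal_range(notes, min_key, max_key):
--     """Find the range in MIDI notes that maps to the most keymap keys."""
--     if not notes:
--         return 0, 127
--     return min(notes), max(notes)
-- ===== Notes on version B (the rewrite author's own statement) =====
-- stated objective: faster
-- what changed: The cubic scan over all (start, end) pairs is replaced by the closed form (min(notes), max(notes)): the widest range always covers the most unique notes, so A's best_range is exactly that pair.
import Mathlib
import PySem

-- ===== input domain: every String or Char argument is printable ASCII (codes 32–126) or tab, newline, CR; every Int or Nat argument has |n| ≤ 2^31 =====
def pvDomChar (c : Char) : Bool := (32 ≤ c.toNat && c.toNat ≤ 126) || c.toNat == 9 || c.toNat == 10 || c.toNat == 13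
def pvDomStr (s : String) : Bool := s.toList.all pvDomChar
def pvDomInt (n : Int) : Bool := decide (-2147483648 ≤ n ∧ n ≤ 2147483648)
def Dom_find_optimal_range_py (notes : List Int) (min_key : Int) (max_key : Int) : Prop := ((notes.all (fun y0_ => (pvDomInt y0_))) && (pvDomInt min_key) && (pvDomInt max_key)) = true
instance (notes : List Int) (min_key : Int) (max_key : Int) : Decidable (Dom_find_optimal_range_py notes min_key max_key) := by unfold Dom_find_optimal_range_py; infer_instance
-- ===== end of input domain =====

-- B replaces A's cubic scan over all (start, end) pairs of unique notes by the closed form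
-- (min(notes), max(notes)); objective: faster (asymptotic, O(n^3) -> O(n)).

-- ===== PORT A =====
-- A-side helpers: the inner-loop body of A, named so the proofs can speak about it
def pvCountA (u : List Int) (s e : Int) : Int :=
  ((u.filter (fun n => decide (s ≤ n ∧ n ≤ e))).length : Int)

def pvStepA (u : List Int) (s : Int) (st : (Int × Int) × Int) (e : Int) : (Int × Int) × Int :=
  if pvCountA u s e > st.2 then ((s, e), pvCountA u s e) else st

def pvOuterA (u : List Int) (st : (Int × Int) × Int) (p : Int × Int) : (Int × Int) × Int :=
  (PySem.List.slice u (some p.1) none).foldl (pvStepA u p.2) st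

def find_optimal_range_py (notes : List Int) (min_key : Int) (max_key : Int) : List Int :=
  if notes = [] then [0, 127]
  else
    let unique_notes := PySem.List.sorted (PySem.Set.ofList notes) (fun x => x) false
    let st := (PySem.List.enumerate unique_notes 0).foldl (pvOuterA unique_notes)
      ((PySem.List.pyGetD unique_notes 0 0, PySem.List.pyGetD unique_notes (-1) 0), 0)
    [st.1.1, st.1.2]

-- ===== PORT B =====
def find_optimal_range_py_alt (notes : List Int) (min_key : Int) (max_key : Int) : List Int :=
  if notes = [] then [0, 127]
  else [(PySem.List.min? notes (fun x => x)).getD 0, (PySem.List.max? notes (fun x => x)).getD 0]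

-- ===== PRECONDITION & SPEC =====
def Spec_find_optimal_range_py (notes : List Int) (min_key : Int) (max_key : Int) (out : List Int) : Prop := out = find_optimal_range_py_alt notes min_key max_key
instance (notes : List Int) (min_key : Int) (max_key : Int) (out : List Int) : Decidable (Spec_find_optimal_range_py notes min_key max_key out) := by unfold Spec_find_optimal_range_py; infer_instance

-- ===== CLAIM (what is proved, stated in full; the proofs are below) =====
def Claim_equal_find_optimal_range_py : Prop := ∀ (notes : List Int) (min_key : Int) (max_key : Int), Dom_find_optimal_range_py notes min_key max_key → Spec_find_optimal_range_py notes min_key max_key (find_optimal_range_py notes min_key max_key)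

-- ===== LEMMAS AND PROOFS =====

-- head of a strictly increasing list is ≤ every element
theorem pv_head_le {u : List Int} (hu : u ≠ []) (hp : u.Pairwise (· < ·)) :
    ∀ x ∈ u, u.head hu ≤ x := by
  cases u with
  | nil => simp at hu
  | cons m t =>
    intro x hx
    rcases List.mem_cons.mp hx with rfl | hx
    · exact le_refl x
    · exact le_of_lt ((List.pairwise_cons.mp hp).1 x hx)

-- every element of a (≤)-pairwise list is ≤ its last element
theorem pv_le_getLast {l : List Int} (hl : l ≠ []) (hp : l.Pairwise (· ≤ ·)) :
    ∀ x ∈ l, x ≤ l.getLast hl := by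
  induction l with
  | nil => simp at hl
  | cons a t ih =>
    intro x hx
    cases t with
    | nil => simp at hx; simp [hx]
    | cons b t' =>
      rw [List.getLast_cons (by simp)]
      rcases List.mem_cons.mp hx with rfl | hx
      · exact le_trans ((List.pairwise_cons.mp hp).1 _ (List.getLast_mem _))
          (le_refl _)
      · exact ih (by simp) (List.pairwise_cons.mp hp).2 x hx

-- elements before the last of a strictly increasing list are < the last
theorem pv_dropLast_lt {l : List Int} (hl : l ≠ []) (hp : l.Pairwise (· < ·)) :
    ∀ x ∈ l.dropLast, x < l.getLast hl := by
  intro x hx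
  have hsplit := List.dropLast_concat_getLast hl
  have hp' : (l.dropLast ++ [l.getLast hl]).Pairwise (· < ·) := by rw [hsplit]; exact hp
  exact (List.pairwise_append.mp hp').2.2 x hx _ (by simp)

-- the full range (head, last) counts every unique note
theorem pv_count_full {u : List Int} (hu : u ≠ []) (hp : u.Pairwise (· < ·)) :
    pvCountA u (u.head hu) (u.getLast hu) = (u.length : Int) := by
  unfold pvCountA
  congr 1
  rw [List.filter_eq_self.mpr]
  intro x hx
  simp only [decide_eq_true_eq]
  exact ⟨pv_head_le hu hp x hx, pv_le_getLast hu (hp.imp le_of_lt) x hx⟩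

-- any window that misses the head or the last counts strictly fewer
theorem pv_count_lt {u : List Int} (hu : u ≠ []) (hp : u.Pairwise (· < ·))
    {s e : Int} (h : (s ∈ u ∧ s ≠ u.head hu) ∨ ¬ (u.getLast hu ≤ e)) :
    pvCountA u s e < (u.length : Int) := by
  unfold pvCountA
  have key : ∃ x ∈ u, ¬ ((fun n => decide (s ≤ n ∧ n ≤ e)) x = true) := by
    rcases h with ⟨hs, hne⟩ | he
    · refine ⟨u.head hu, List.head_mem hu, ?_⟩
      simp only [decide_eq_true_eq, not_and]
      intro hle _
      exact hne (le_antisymm hle (pv_head_le hu hp s hs))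
    · refine ⟨u.getLast hu, List.getLast_mem hu, ?_⟩
      simp only [decide_eq_true_eq, not_and]
      intro _
      exact he
  have := List.length_filter_lt_length_iff_exists.mpr key
  exact_mod_cast this

-- folding the inner step keeps the count below N as long as every new count is below N
theorem pv_inner_lt {u : List Int} {s : Int} {N : Int} (es : List Int) (st : (Int × Int) × Int)
    (hst : st.2 < N) (hes : ∀ e ∈ es, pvCountA u s e < N) :
    (es.foldl (pvStepA u s) st).2 < N := by
  induction es generalizing st with
  | nil => exact hst
  | cons e es ih =>
    simp only [List.foldl_cons]
    apply ih
    · unfold pvStepA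
      split
      · exact hes e (by simp)
      · exact hst
    · intro e' he'; exact hes e' (by simp [he'])

-- folding the inner step does nothing when no count beats the current best
theorem pv_inner_id {u : List Int} {s : Int} (es : List Int) (st : (Int × Int) × Int)
    (h : ∀ e ∈ es, ¬ (pvCountA u s e > st.2)) :
    es.foldl (pvStepA u s) st = st := by
  induction es with
  | nil => rfl
  | cons e es ih =>
    simp only [List.foldl_cons]
    rw [show pvStepA u s st e = st from if_neg (h e (by simp))]
    exact ih (fun e' he' => h e' (by simp [he']))

-- a fold whose step fixes the state is the identity
theorem pv_foldl_fixed {α β : Type} (f : α → β → α) (l : List β) (st : α)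
    (h : ∀ p ∈ l, f st p = st) : l.foldl f st = st := by
  induction l with
  | nil => rfl
  | cons p l ih =>
    simp only [List.foldl_cons, h p (by simp)]
    exact ih (fun q hq => h q (by simp [hq]))

theorem find_optimal_range_py_spec : Claim_equal_find_optimal_range_py := by
  unfold Claim_equal_find_optimal_range_py
  intro notes min_key max_key _
  unfold Spec_find_optimal_range_py find_optimal_range_py find_optimal_range_py_alt
  by_cases hn : notes = []
  · simp [hn]
  · simp only [if_neg hn]
    set u := PySem.List.sorted (PySem.Set.ofList notes) (fun x => x) false with hu_def
    have hp : u.Pairwise (· < ·) := hu_def ▸ PySem.List.sorted_ofList_pairwise_lt notes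
    have hmemu : ∀ x : Int, x ∈ u ↔ x ∈ notes := by
      intro x
      rw [hu_def, PySem.List.mem_sorted, PySem.Set.mem_ofList]
    have hu : u ≠ [] := by
      obtain ⟨y, hy⟩ := List.exists_mem_of_ne_nil notes hn
      exact List.ne_nil_of_mem ((hmemu y).mpr hy)
    obtain ⟨m, t, hmt⟩ : ∃ m t, u = m :: t := by
      cases hc : u with
      | nil => exact absurd hc hu
      | cons a b => exact ⟨a, b, rfl⟩
    have hhead : u.head hu = m := by simp [hmt]
    set M := u.getLast hu with hM
    set N : Int := (u.length : Int) with hN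
    have hNpos : 0 < N := by
      rw [hN]; exact_mod_cast List.length_pos_of_ne_nil hu
    -- phase 1: the first outer iteration ends in ((m, M), N)
    have hslice0 : PySem.List.slice u (some 0) none = u := by
      have h00 : ((0 : Nat) : Int) = (0 : Int) := rfl
      have := PySem.List.slice_from_natCast (xs := u) (a := 0)
      rw [h00, List.drop_zero] at this
      exact this
    have phase1 : ∀ r : Int × Int, pvOuterA u ((r.1, r.2), 0) (0, m) = ((m, M), N) := by
      intro r
      unfold pvOuterA
      simp only [hslice0]
      have hsplit : u = u.dropLast ++ [M] := (List.dropLast_concat_getLast hu).symm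
      rw [show List.foldl (pvStepA u m) ((r.1, r.2), 0) u
            = List.foldl (pvStepA u m) ((r.1, r.2), 0) (u.dropLast ++ [M]) from
          congrArg (fun l => List.foldl (pvStepA u m) ((r.1, r.2), 0) l) hsplit]
      rw [List.foldl_append]
      have hst1 : (u.dropLast.foldl (pvStepA u m) ((r.1, r.2), 0)).2 < N := by
        apply pv_inner_lt
        · exact hNpos
        · intro e he
          refine pv_count_lt hu hp (Or.inr ?_)
          exact not_le.mpr (pv_dropLast_lt hu hp e he)
      simp only [List.foldl_cons, List.foldl_nil]
      unfold pvStepA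
      rw [if_pos]
      · have : pvCountA u m M = N := by
          rw [← hhead]; exact pv_count_full hu hp
        rw [this]
      · have : pvCountA u m M = N := by
          rw [← hhead]; exact pv_count_full hu hp
        rw [this]; exact hst1
    -- phase 2: every later outer iteration leaves ((m, M), N) unchanged
    have phase2 : (PySem.List.enumerate t 1).foldl (pvOuterA u) ((m, M), N) = ((m, M), N) := by
      apply pv_foldl_fixed
      intro p hp2
      have hs : p.2 ∈ t := by
        have := List.mem_map_of_mem (f := Prod.snd) hp2
        rwa [PySem.List.map_snd_enumerate] at this
      unfold pvOuterA
      apply pv_inner_id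
      intro e he
      have hcnt : pvCountA u p.2 e < N := by
        refine pv_count_lt hu hp (Or.inl ⟨?_, ?_⟩)
        · rw [hmt]; exact List.mem_cons_of_mem m hs
        · rw [hhead]
          have : m < p.2 := by
            rw [hmt] at hp
            exact (List.pairwise_cons.mp hp).1 p.2 hs
          omega
      simp only [gt_iff_lt, not_lt]
      exact le_of_lt hcnt
    -- assemble A's result
    have hA : (PySem.List.enumerate u 0).foldl (pvOuterA u)
        ((PySem.List.pyGetD u 0 0, PySem.List.pyGetD u (-1) 0), 0) = ((m, M), N) := by
      rw [hmt, PySem.List.enumerate_cons, List.foldl_cons, ← hmt]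
      rw [phase1 (PySem.List.pyGetD u 0 0, PySem.List.pyGetD u (-1) 0)]
      exact phase2
    simp only [hA]
    -- B's result: min and max of notes are m and M
    have hmin : (PySem.List.min? notes (fun x => x)).getD 0 = m := by
      cases hmv : PySem.List.min? notes (fun x => x) with
      | none => exact absurd (((PySem.List.min?_eq_none_iff notes (fun x => x)).mp hmv)) hn
      | some v =>
        have hvmem : v ∈ notes := PySem.List.min?_mem hmv
        have hvmin : ∀ y ∈ notes, v ≤ y := PySem.List.min?_isMin hmv
        have h1 : v ≤ m := hvmin m ((hmemu m).mp (by rw [hmt]; simp))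
        have h2 : m ≤ v := by
          rw [← hhead]; exact pv_head_le hu hp v ((hmemu v).mpr hvmem)
        simp [le_antisymm h1 h2]
    have hmax : (PySem.List.max? notes (fun x => x)).getD 0 = M := by
      cases hmv : PySem.List.max? notes (fun x => x) with
      | none => exact absurd (((PySem.List.max?_eq_none_iff notes (fun x => x)).mp hmv)) hn
      | some v =>
        have hvmem : v ∈ notes := PySem.List.max?_mem hmv
        have hvmax : ∀ y ∈ notes, y ≤ v := PySem.List.max?_isMax hmv
        have h1 : M ≤ v := hvmax M ((hmemu M).mp (List.getLast_mem hu))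
        have h2 : v ≤ M := pv_le_getLast hu (hp.imp le_of_lt) v ((hmemu v).mpr hvmem)
        simp [le_antisymm h2 h1]
    rw [hmin, hmax]
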